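-- pv_equiv track=rewrite | github.com/nickderobertis/py-finstmt | finstmt/clean/name.py | standardize_name_for_look_up
-- ===== SOURCE A (Python) =====
-- import string
-- from typing import Any
--
-- def standardize_name_for_look_up(name: Any) -> str:
--     """
--     Used internally to standardize names in DataFrames before looking up in name configs to match DataFrame
--     data to data classes
--     """
--     if not isinstance(name, str):
--         return name
--
--     name = name.lower().strip()
--     name = ' '.join(name.split('_'))
--     name = name.translate(str.maketrans('', '', string.punctuation))  # remove punctuation
--     name = ' '.join([part for part in name.split(' ') if part])  # ensure there is only a single space between words
--     return name
-- ===== SOURCE B (Python) =====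
-- import string
-- from typing import Any
--
-- def standardize_name_for_look_up(name: Any) -> str:
--     """Single left-to-right scan building words directly (no split/translate/join chain)."""
--     if not isinstance(name, str):
--         return name
--     words = []
--     current = []
--     for ch in name.lower().strip():
--         if ch == '_' or ch == ' ':
--             if current:
--                 words.append(''.join(current))
--                 current = []
--         elif ch in string.punctuation:
--             continue
--         else:
--             current.append(ch)
--     if current:
--         words.append(''.join(current))
--     return ' '.join(words)
-- ===== Notes on version B (the rewrite author's own statement) =====
-- stated objective: alternative
-- what changed: Replaces A's four-stage split('_')/join, translate-delete-punctuation, split(' ')/filter/join pipeline with a single left-to-right scan that builds the words directly (underscore/space ends the current word, punctuation is skipped, words are joined once at the end).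
import Mathlib
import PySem

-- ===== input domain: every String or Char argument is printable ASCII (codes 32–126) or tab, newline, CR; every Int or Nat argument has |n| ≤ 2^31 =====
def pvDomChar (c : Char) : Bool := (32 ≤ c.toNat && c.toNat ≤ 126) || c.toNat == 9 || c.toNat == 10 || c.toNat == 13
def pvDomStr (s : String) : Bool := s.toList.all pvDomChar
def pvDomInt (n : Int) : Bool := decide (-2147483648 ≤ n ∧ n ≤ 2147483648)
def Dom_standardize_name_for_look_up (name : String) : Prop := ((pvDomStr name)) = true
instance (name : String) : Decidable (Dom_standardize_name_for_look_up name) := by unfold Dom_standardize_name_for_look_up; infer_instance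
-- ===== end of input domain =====

-- B is an alternative single-scan decomposition of A's split/translate/join chain; same cost class, no speed claim.

-- string.punctuation (shared constant of both Python sources)
def pyPunct : List Char := "!\"#$%&'()*+,-./:;<=>?@[\\]^_`{|}~".toList

-- ===== PORT A =====
def standardize_name_for_look_up (name : String) : String :=
  -- name = name.lower().strip()
  let s1 := PySem.Chars.strip (PySem.Chars.lower name.toList)
  -- name = ' '.join(name.split('_'))
  let s2 := PySem.Chars.join [' '] (PySem.Chars.splitOn s1 ['_'])
  -- name = name.translate(str.maketrans('', '', string.punctuation))  (delete every punctuation char)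
  let s3 := s2.filter (fun c => !(decide (c ∈ pyPunct)))
  -- name = ' '.join([part for part in name.split(' ') if part])
  let s4 := PySem.Chars.join [' '] ((PySem.Chars.splitOn s3 [' ']).filter (fun p => decide (p ≠ [])))
  String.mk s4

-- ===== PORT B =====
-- the for-loop of Source B: state (current word, finished words)
def altGo : List Char → List Char → List (List Char) → List (List Char)
  | [], cur, ws => ws ++ (if cur ≠ [] then [cur] else [])
  | c :: r, cur, ws =>
    if c = '_' ∨ c = ' ' then altGo r [] (ws ++ (if cur ≠ [] then [cur] else []))
    else if c ∈ pyPunct then altGo r cur ws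
    else altGo r (cur ++ [c]) ws

def standardize_name_for_look_up_alt (name : String) : String :=
  String.mk (PySem.Chars.join [' '] (altGo (PySem.Chars.strip (PySem.Chars.lower name.toList)) [] []))

-- ===== PRECONDITION & SPEC =====
def Spec_standardize_name_for_look_up (name : String) (out : String) : Prop := out = standardize_name_for_look_up_alt name
instance (name : String) (out : String) : Decidable (Spec_standardize_name_for_look_up name out) := by unfold Spec_standardize_name_for_look_up; infer_instance

-- ===== CLAIM (what is proved, stated in full; the proofs are below) =====
def Claim_equal_standardize_name_for_look_up : Prop := ∀ (name : String), Dom_standardize_name_for_look_up name → Spec_standardize_name_for_look_up name (standardize_name_for_look_up name)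

-- ===== LEMMAS AND PROOFS =====

-- simple recursion computing Python's s.split(sep) for a one-char sep
def splitCh (sep : Char) : List Char → List (List Char)
  | [] => [[]]
  | c :: r => if c = sep then [] :: splitCh sep r else (splitCh sep r).modifyHead (c :: ·)

theorem splitCh_ne_nil (sep : Char) (l : List Char) : splitCh sep l ≠ [] := by
  cases l with
  | nil => simp [splitCh]
  | cons c r =>
    simp only [splitCh]
    split
    · simp
    · cases h : splitCh sep r with
      | nil => exact absurd h (splitCh_ne_nil sep r)
      | cons a t => simp [List.modifyHead]

theorem splitOn_go_eq (sep : Char) (l : List Char) :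
    ∀ (fuel : Nat) (cur : List Char) (acc : List (List Char)), l.length ≤ fuel →
      PySem.Chars.splitOn.go [sep] fuel l cur acc
        = acc.reverse ++ (splitCh sep l).modifyHead (cur.reverse ++ ·) := by
  induction l with
  | nil =>
    intro fuel cur acc _
    cases fuel <;> simp [PySem.Chars.splitOn.go, splitCh]
  | cons c r ih =>
    intro fuel cur acc hf
    cases fuel with
    | zero => simp at hf
    | succ fuel =>
      rw [PySem.Chars.splitOn.go]
      by_cases hc : c = sep
      · subst hc
        have hpre : List.isPrefixOf [c] (c :: r) = true := by simp [List.isPrefixOf]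
        rw [if_pos hpre]
        simp only [List.length_cons] at hf
        simp only [List.length_cons, List.length_nil, List.drop_succ_cons, List.drop_zero]
        rw [ih fuel [] (cur.reverse :: acc) (by omega)]
        simp only [splitCh, if_pos rfl, List.modifyHead, List.reverse_cons, List.append_assoc,
          List.reverse_nil, List.nil_append, List.singleton_append, List.cons_append, List.append_nil]
        cases hS : splitCh c r with
        | nil => exact absurd hS (splitCh_ne_nil c r)
        | cons a t' => simp [List.modifyHead]
      · have hpre : List.isPrefixOf [sep] (c :: r) = false := by
          simp [List.isPrefixOf]; exact fun h => absurd h.symm hc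
        rw [if_neg (by simp [hpre])]
        simp only [List.length_cons] at hf
        rw [ih fuel (c :: cur) acc (by omega)]
        simp only [splitCh, if_neg hc]
        cases h : splitCh sep r with
        | nil => exact absurd h (splitCh_ne_nil sep r)
        | cons a t => simp [List.modifyHead]

theorem splitOn_eq_splitCh (sep : Char) (l : List Char) :
    PySem.Chars.splitOn l [sep] = splitCh sep l := by
  have := splitOn_go_eq sep l (l.length + 1) [] [] (by omega)
  rw [PySem.Chars.splitOn, this]
  cases h : splitCh sep l with
  | nil => exact absurd h (splitCh_ne_nil sep l)
  | cons a t => simp [List.modifyHead]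

-- replace '_' by ' ' (what '_'-split followed by ' '-join does)
def repl (c : Char) : Char := if c = '_' then ' ' else c

theorem flatten_intersperse_cons (s a : List Char) (t' : List (List Char)) (c : Char) :
    (List.intersperse s ((c :: a) :: t')).flatten = c :: (List.intersperse s (a :: t')).flatten := by
  cases t' <;> simp [List.intersperse]

theorem join_splitCh_underscore (t : List Char) :
    PySem.Chars.join [' '] (splitCh '_' t) = t.map repl := by
  induction t with
  | nil => simp [splitCh, PySem.Chars.join, List.intercalate, List.intersperse]
  | cons c r ih =>
    simp only [splitCh, List.map_cons]
    by_cases hc : c = '_'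
    · subst hc
      rw [if_pos rfl]
      cases h : splitCh '_' r with
      | nil => exact absurd h (splitCh_ne_nil '_' r)
      | cons a t' =>
        rw [h] at ih
        simp [PySem.Chars.join, List.intercalate] at ih ⊢
        simp [repl, ih]
    · rw [if_neg hc]
      cases h : splitCh '_' r with
      | nil => exact absurd h (splitCh_ne_nil '_' r)
      | cons a t' =>
        rw [h] at ih
        simp only [List.modifyHead]
        simp only [PySem.Chars.join, List.intercalate] at ih ⊢
        rw [flatten_intersperse_cons, ih]
        simp [repl, if_neg hc]

-- deleting non-space chars commutes with splitting on ' '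
theorem filter_splitCh_comm (keep : Char → Bool) (hkeep : keep ' ' = true) (l : List Char) :
    splitCh ' ' (l.filter keep) = (splitCh ' ' l).map (List.filter keep) := by
  induction l with
  | nil => simp [splitCh]
  | cons c r ih =>
    by_cases hc : c = ' '
    · subst hc
      simp [List.filter_cons, hkeep, splitCh, ih]
    · cases h : splitCh ' ' r with
      | nil => exact absurd h (splitCh_ne_nil ' ' r)
      | cons a t' =>
        rw [h] at ih
        by_cases hk : keep c = true
        · simp [List.filter_cons, hk, splitCh, if_neg hc, ih, h, List.modifyHead, hk]
        · simp only [Bool.not_eq_true] at hk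
          simp [List.filter_cons, hk, splitCh, if_neg hc, ih, h, List.modifyHead]

-- the scan of Source B produces exactly the nonempty punctuation-stripped pieces of the ' '-split
theorem altGo_eq (t : List Char) :
    ∀ (cur : List Char) (ws : List (List Char)),
      altGo t cur ws
        = ws ++ (((splitCh ' ' (t.map repl)).map
            (List.filter (fun c => !(decide (c ∈ pyPunct))))).modifyHead (cur ++ ·)).filter
            (fun p => decide (p ≠ [])) := by
  induction t with
  | nil =>
    intro cur ws
    simp only [altGo, List.map_nil, splitCh, List.map_cons, List.map_nil, List.filter_nil,
      List.modifyHead, List.append_nil]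
    by_cases h : cur = [] <;> simp [h, List.filter_cons]
  | cons c r ih =>
    intro cur ws
    by_cases hsp : c = '_' ∨ c = ' '
    · have hr : repl c = ' ' := by rcases hsp with h | h <;> simp [repl, h]
      rw [show altGo (c :: r) cur ws = altGo r [] (ws ++ (if cur ≠ [] then [cur] else [])) from by
        simp [altGo, hsp]]
      rw [ih [] (ws ++ (if cur ≠ [] then [cur] else []))]
      simp only [List.map_cons, hr, splitCh, if_pos rfl, List.map_cons, List.filter_nil,
        List.modifyHead, List.filter_cons]
      cases hS : (splitCh ' ' (r.map repl)).map (List.filter (fun c => !(decide (c ∈ pyPunct)))) with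
      | nil =>
        exact absurd (List.map_eq_nil_iff.mp hS) (splitCh_ne_nil ' ' (r.map repl))
      | cons a t' =>
        by_cases h : cur = [] <;>
          simp [h, hS, List.modifyHead, List.filter_cons, List.append_assoc]
    · push_neg at hsp
      have hr : repl c = c := by simp [repl, hsp.1]
      by_cases hp : c ∈ pyPunct
      · rw [show altGo (c :: r) cur ws = altGo r cur ws from by
          simp [altGo, hsp.1, hsp.2, hp]]
        rw [ih cur ws]
        simp only [List.map_cons, hr, splitCh, if_neg hsp.2]
        cases hS : splitCh ' ' (r.map repl) with
        | nil => exact absurd hS (splitCh_ne_nil ' ' (r.map repl))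
        | cons a t' =>
          simp [hS, List.modifyHead, List.filter_cons, hp]
      · rw [show altGo (c :: r) cur ws = altGo r (cur ++ [c]) ws from by
          simp [altGo, hsp.1, hsp.2, hp]]
        rw [ih (cur ++ [c]) ws]
        simp only [List.map_cons, hr, splitCh, if_neg hsp.2]
        cases hS : splitCh ' ' (r.map repl) with
        | nil => exact absurd hS (splitCh_ne_nil ' ' (r.map repl))
        | cons a t' =>
          simp [hS, List.modifyHead, List.filter_cons, hp, List.append_assoc]

theorem lists_eq (t : List Char) :
    PySem.Chars.join [' ']
        (((PySem.Chars.splitOn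
            ((PySem.Chars.join [' '] (PySem.Chars.splitOn t ['_'])).filter
              (fun c => !(decide (c ∈ pyPunct)))) [' '])).filter (fun p => decide (p ≠ [])))
      = PySem.Chars.join [' '] (altGo t [] []) := by
  rw [splitOn_eq_splitCh '_' t, join_splitCh_underscore, splitOn_eq_splitCh ' ' _,
    filter_splitCh_comm (fun c => !(decide (c ∈ pyPunct))) (by decide)]
  rw [altGo_eq t [] []]
  cases hS : (splitCh ' ' (t.map repl)).map (List.filter (fun c => !(decide (c ∈ pyPunct)))) with
  | nil => exact absurd (List.map_eq_nil_iff.mp hS) (splitCh_ne_nil ' ' (t.map repl))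
  | cons a t' => simp [List.modifyHead]

-- ===== VERDICT (by name: the statement is the Claim_ definition above) =====
theorem standardize_name_for_look_up_spec : Claim_equal_standardize_name_for_look_up := by
  intro name _
  exact congrArg String.mk (lists_eq (PySem.Chars.strip (PySem.Chars.lower name.toList)))
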